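-- pv_equiv track=rewrite | github.com/shirinmhb/tic-tac-toe | tic-tac-toe.py | count_2succesive
-- ===== SOURCE A (Python) =====
-- def count_2succesive(stateBoard, player):
--   f = 0
--   #check rows
--   for i in range(3):
--     if (stateBoard[i][0] == stateBoard[i][1] == player) and (stateBoard[i][2] == ' '):
--       f += 1
--     if (stateBoard[i][0] == stateBoard[i][2] == player) and (stateBoard[i][1] == ' '):
--       f += 1
--     if (stateBoard[i][2] == stateBoard[i][1] == player) and (stateBoard[i][0] == ' '):
--       f += 1
--
--   #check columns
--   for i in range(3):
--     if (stateBoard[0][i] == stateBoard[1][i] == player) and (stateBoard[2][i] == ' '):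
--       f += 1
--     if (stateBoard[0][i] == stateBoard[2][i] == player) and (stateBoard[1][i] == ' '):
--       f += 1
--     if (stateBoard[2][i] == stateBoard[1][i] == player) and (stateBoard[0][i] == ' '):
--       f += 1
--
--   #check diagonal
--   if (stateBoard[0][0] == stateBoard[1][1] == player) and (stateBoard[2][2] == ' '):
--     f += 1
--   if (stateBoard[0][0] == stateBoard[2][2] == player) and (stateBoard[1][1] == ' '):
--     f += 1
--   if (stateBoard[2][2] == stateBoard[1][1] == player) and (stateBoard[0][0] == ' '):
--     f += 1
--   if (stateBoard[2][0] == stateBoard[1][1] == player) and (stateBoard[0][2] == ' '):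
--     f += 1
--   if (stateBoard[2][0] == stateBoard[0][2] == player) and (stateBoard[1][1] == ' '):
--     f += 1
--   if (stateBoard[0][2] == stateBoard[1][1] == player) and (stateBoard[2][0] == ' '):
--     f += 1
--   return f
-- ===== SOURCE B (Python) =====
-- def count_2succesive(stateBoard, player):
--     lines = ([[stateBoard[r][c] for c in range(3)] for r in range(3)]
--              + [[stateBoard[r][c] for r in range(3)] for c in range(3)]
--              + [[stateBoard[i][i] for i in range(3)],
--                 [stateBoard[i][2 - i] for i in range(3)]])
--     target = sorted([player, player, ' '])
--     return sum(line.count(' ') for line in lines if sorted(line) == target)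
-- ===== Notes on version B (the rewrite author's own statement) =====
-- stated objective: simpler
-- what changed: Instead of 24 positional two-in-a-row conditionals, B builds the 8 board lines as value lists and, per line, compares the line's sorted multiset with sorted([player, player, ' ']), summing the line's blank counts on a match.
import Mathlib
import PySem

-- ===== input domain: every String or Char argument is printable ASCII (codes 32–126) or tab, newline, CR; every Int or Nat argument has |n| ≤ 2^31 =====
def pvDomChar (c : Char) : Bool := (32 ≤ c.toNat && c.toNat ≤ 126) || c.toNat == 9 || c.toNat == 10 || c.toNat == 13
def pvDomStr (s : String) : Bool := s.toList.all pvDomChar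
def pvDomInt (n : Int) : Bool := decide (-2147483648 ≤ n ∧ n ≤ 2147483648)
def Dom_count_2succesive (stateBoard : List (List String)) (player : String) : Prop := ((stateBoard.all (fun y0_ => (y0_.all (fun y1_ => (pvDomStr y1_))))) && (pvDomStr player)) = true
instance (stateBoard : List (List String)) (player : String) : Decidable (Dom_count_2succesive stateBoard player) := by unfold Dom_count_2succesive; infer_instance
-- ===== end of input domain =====

set_option maxRecDepth 16000
set_option maxHeartbeats 2000000


-- B replaces A's 24 positional conditionals by a multiset test: build the 8 board lines as
-- value lists, keep the lines whose sorted multiset equals sorted([player, player, ' ']),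
-- and sum their blank counts (objective: simpler).

-- ===== PORT A =====
-- stateBoard[r][c] ; in-range under Pre_, so the defaults are never used there
def pvCellA (b : List (List String)) (r c : Int) : String :=
  PySem.List.pyGetD (PySem.List.pyGetD b r []) c ""

def count_2succesive (stateBoard : List (List String)) (player : String) : Int :=
  let f : Int := 0
  -- check rows
  let f := (PySem.List.pyRange 0 3 1).foldl (fun f i =>
    let f := if pvCellA stateBoard i 0 = pvCellA stateBoard i 1 ∧ pvCellA stateBoard i 1 = player ∧ pvCellA stateBoard i 2 = " " then f + 1 else f
    let f := if pvCellA stateBoard i 0 = pvCellA stateBoard i 2 ∧ pvCellA stateBoard i 2 = player ∧ pvCellA stateBoard i 1 = " " then f + 1 else f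
    let f := if pvCellA stateBoard i 2 = pvCellA stateBoard i 1 ∧ pvCellA stateBoard i 1 = player ∧ pvCellA stateBoard i 0 = " " then f + 1 else f
    f) f
  -- check columns
  let f := (PySem.List.pyRange 0 3 1).foldl (fun f i =>
    let f := if pvCellA stateBoard 0 i = pvCellA stateBoard 1 i ∧ pvCellA stateBoard 1 i = player ∧ pvCellA stateBoard 2 i = " " then f + 1 else f
    let f := if pvCellA stateBoard 0 i = pvCellA stateBoard 2 i ∧ pvCellA stateBoard 2 i = player ∧ pvCellA stateBoard 1 i = " " then f + 1 else f
    let f := if pvCellA stateBoard 2 i = pvCellA stateBoard 1 i ∧ pvCellA stateBoard 1 i = player ∧ pvCellA stateBoard 0 i = " " then f + 1 else f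
    f) f
  -- check diagonal
  let f := if pvCellA stateBoard 0 0 = pvCellA stateBoard 1 1 ∧ pvCellA stateBoard 1 1 = player ∧ pvCellA stateBoard 2 2 = " " then f + 1 else f
  let f := if pvCellA stateBoard 0 0 = pvCellA stateBoard 2 2 ∧ pvCellA stateBoard 2 2 = player ∧ pvCellA stateBoard 1 1 = " " then f + 1 else f
  let f := if pvCellA stateBoard 2 2 = pvCellA stateBoard 1 1 ∧ pvCellA stateBoard 1 1 = player ∧ pvCellA stateBoard 0 0 = " " then f + 1 else f
  let f := if pvCellA stateBoard 2 0 = pvCellA stateBoard 1 1 ∧ pvCellA stateBoard 1 1 = player ∧ pvCellA stateBoard 0 2 = " " then f + 1 else f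
  let f := if pvCellA stateBoard 2 0 = pvCellA stateBoard 0 2 ∧ pvCellA stateBoard 0 2 = player ∧ pvCellA stateBoard 1 1 = " " then f + 1 else f
  let f := if pvCellA stateBoard 0 2 = pvCellA stateBoard 1 1 ∧ pvCellA stateBoard 1 1 = player ∧ pvCellA stateBoard 2 0 = " " then f + 1 else f
  f

-- ===== PORT B =====
def pvCellB (b : List (List String)) (r c : Int) : String :=
  PySem.List.pyGetD (PySem.List.pyGetD b r []) c ""

def count_2succesive_alt (stateBoard : List (List String)) (player : String) : Int :=
  let lines : List (List String) :=
    (PySem.List.pyRange 0 3 1).map (fun r => (PySem.List.pyRange 0 3 1).map (fun c => pvCellB stateBoard r c))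
    ++ (PySem.List.pyRange 0 3 1).map (fun c => (PySem.List.pyRange 0 3 1).map (fun r => pvCellB stateBoard r c))
    ++ [(PySem.List.pyRange 0 3 1).map (fun i => pvCellB stateBoard i i),
        (PySem.List.pyRange 0 3 1).map (fun i => pvCellB stateBoard i (2 - i))]
  let target := PySem.List.sorted [player, player, " "] (fun s => s) false
  lines.foldl (fun acc line =>
    if PySem.List.sorted line (fun s => s) false = target
    then acc + (PySem.List.count line " " : Int) else acc) 0

-- ===== PRECONDITION & SPEC =====
-- Pre_ excludes boards with fewer than 3 rows or a row among the first three with fewer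
-- than 3 cells: Python A raises IndexError there.
def Pre_count_2succesive (stateBoard : List (List String)) (player : String) : Prop :=
  3 ≤ stateBoard.length ∧ ∀ row ∈ stateBoard.take 3, 3 ≤ row.length
instance (stateBoard : List (List String)) (player : String) : Decidable (Pre_count_2succesive stateBoard player) := by unfold Pre_count_2succesive; infer_instance

def pvWitness_count_2succesive : List (List String) × String :=
  ([["X", "X", " "], ["O", " ", " "], [" ", " ", "O"]], "X")

def Spec_count_2succesive (stateBoard : List (List String)) (player : String) (out : Int) : Prop := out = count_2succesive_alt stateBoard player
instance (stateBoard : List (List String)) (player : String) (out : Int) : Decidable (Spec_count_2succesive stateBoard player out) := by unfold Spec_count_2succesive; infer_instance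

-- ===== CLAIM (what is proved, stated in full; the proofs are below) =====
def Claim_equal_count_2succesive : Prop := ∀ (stateBoard : List (List String)) (player : String), Dom_count_2succesive stateBoard player → Pre_count_2succesive stateBoard player → Spec_count_2succesive stateBoard player (count_2succesive stateBoard player)

-- ===== LEMMAS AND PROOFS =====

-- Python's chained 'a == b == p' is 'a = b ∧ b = p'; canonical form is 'a = p ∧ b = p'
theorem pvChain_iff (x y z p s : String) : (x = y ∧ y = p ∧ z = s) ↔ (x = p ∧ y = p ∧ z = s) := by
  constructor <;> rintro ⟨h1, h2, h3⟩ <;> subst_vars <;> exact ⟨rfl, rfl, rfl⟩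

-- canonical threat count of one line (x, y, z) for player p
def pvCnt (x y z p : String) : Int :=
  (if x = p ∧ y = p ∧ z = " " then 1 else 0) +
  (if x = p ∧ z = p ∧ y = " " then 1 else 0) +
  (if y = p ∧ z = p ∧ x = " " then 1 else 0)

theorem pvCnt_comm (x y z p : String) : pvCnt x y z p = pvCnt z y x p := by
  unfold pvCnt
  split_ifs <;> first | omega | tauto

-- A's three conditionals for one line collapse to pvCnt
theorem pvLineA (x y z p : String) (f : Int) :
    (if z = y ∧ y = p ∧ x = " "
     then (if x = z ∧ z = p ∧ y = " " then (if x = y ∧ y = p ∧ z = " " then f + 1 else f) + 1 else (if x = y ∧ y = p ∧ z = " " then f + 1 else f)) + 1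
     else (if x = z ∧ z = p ∧ y = " " then (if x = y ∧ y = p ∧ z = " " then f + 1 else f) + 1 else (if x = y ∧ y = p ∧ z = " " then f + 1 else f)))
    = f + pvCnt x y z p := by
  unfold pvCnt
  simp only [pvChain_iff x y z, pvChain_iff x z y, pvChain_iff z y x]
  split_ifs <;> first | omega | tauto

-- a 3-element list is a permutation of [" ", " ", " "] iff all its entries are blank
theorem pvPermBlank (x y z : String) :
    [x, y, z].Perm [" ", " ", " "] ↔ (x = " " ∧ y = " " ∧ z = " ") := by
  constructor
  · intro h
    have hx : x = " " := by have := h.subset (List.mem_cons_self ..); simpa using this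
    have hy : y = " " := by
      have : y ∈ [" ", " ", " "] := h.subset (by simp)
      simpa using this
    have hz : z = " " := by
      have : z ∈ [" ", " ", " "] := h.subset (by simp)
      simpa using this
    exact ⟨hx, hy, hz⟩
  · rintro ⟨hx, hy, hz⟩; subst hx; subst hy; subst hz; exact List.Perm.refl _

-- a 3-element list is a permutation of [p, p, " "] (p ≠ " ") iff exactly one entry is
-- blank and the other two are p
theorem pvPermLine (x y z p : String) (hp : p ≠ " ") :
    [x, y, z].Perm [p, p, " "] ↔
      ((x = " " ∧ y = p ∧ z = p) ∨ (y = " " ∧ x = p ∧ z = p) ∨ (z = " " ∧ x = p ∧ y = p)) := by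
  constructor
  · intro h
    have hx : x = p ∨ x = " " := by
      have : x ∈ [p, p, " "] := h.subset (by simp); simpa using this
    have hy : y = p ∨ y = " " := by
      have : y ∈ [p, p, " "] := h.subset (by simp); simpa using this
    have hz : z = p ∨ z = " " := by
      have : z ∈ [p, p, " "] := h.subset (by simp); simpa using this
    have hc := h.count_eq " "
    rcases hx with hx | hx <;> rcases hy with hy | hy <;> rcases hz with hz | hz <;>
      subst_vars <;> simp_all [List.count_cons]
  · intro h
    have key : ∀ a, [x, y, z].count a = [p, p, " "].count a := by
      intro a
      rcases h with ⟨h1, h2, h3⟩ | ⟨h1, h2, h3⟩ | ⟨h1, h2, h3⟩ <;> subst_vars <;>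
        simp [List.count_cons] <;> omega
    exact List.perm_iff_count.mpr key

-- B's per-line step (multiset match, weighted by blank count) collapses to pvCnt
theorem pvLineB (x y z p : String) (f : Int) :
    (if PySem.List.sorted [x, y, z] (fun s => s) false
        = PySem.List.sorted [p, p, " "] (fun s => s) false
     then f + (PySem.List.count [x, y, z] " " : Int) else f) = f + pvCnt x y z p := by
  simp only [PySem.List.count_eq]
  split_ifs with h
  · have hperm : [x, y, z].Perm [p, p, " "] :=
      (PySem.List.sorted_id_eq_sorted_id_iff_perm _ _).mp h
    by_cases hp : p = " "
    · subst hp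
      obtain ⟨hx, hy, hz⟩ := (pvPermBlank x y z).mp hperm
      subst hx; subst hy; subst hz
      simp [List.count_cons, pvCnt]
    · rcases (pvPermLine x y z p hp).mp hperm with ⟨h1, h2, h3⟩ | ⟨h1, h2, h3⟩ | ⟨h1, h2, h3⟩ <;>
        subst_vars <;> simp [List.count_cons, pvCnt, hp]
  · have hnp : ¬ [x, y, z].Perm [p, p, " "] := fun hperm =>
      h ((PySem.List.sorted_id_eq_sorted_id_iff_perm _ _).mpr hperm)
    by_cases hp : p = " "
    · subst hp
      have : ¬ (x = " " ∧ y = " " ∧ z = " ") := fun hc => hnp ((pvPermBlank x y z).mpr hc)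
      unfold pvCnt
      split_ifs <;> first | omega | tauto
    · have : ¬ ((x = " " ∧ y = p ∧ z = p) ∨ (y = " " ∧ x = p ∧ z = p) ∨ (z = " " ∧ x = p ∧ y = p)) :=
        fun hc => hnp ((pvPermLine x y z p hp).mpr hc)
      unfold pvCnt
      split_ifs <;> first | omega | tauto

theorem pvCellB_eq_A : pvCellB = pvCellA := rfl

-- ===== VERDICT (by name: the statement is the Claim_ definition above) =====
theorem count_2succesive_spec : Claim_equal_count_2succesive := by
  intro sb p _ _
  unfold Spec_count_2succesive
  have hr : PySem.List.pyRange 0 3 1 = [0, 1, 2] := by decide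
  have hA : count_2succesive sb p =
      0 + pvCnt (pvCellA sb 0 0) (pvCellA sb 0 1) (pvCellA sb 0 2) p
        + pvCnt (pvCellA sb 1 0) (pvCellA sb 1 1) (pvCellA sb 1 2) p
        + pvCnt (pvCellA sb 2 0) (pvCellA sb 2 1) (pvCellA sb 2 2) p
        + pvCnt (pvCellA sb 0 0) (pvCellA sb 1 0) (pvCellA sb 2 0) p
        + pvCnt (pvCellA sb 0 1) (pvCellA sb 1 1) (pvCellA sb 2 1) p
        + pvCnt (pvCellA sb 0 2) (pvCellA sb 1 2) (pvCellA sb 2 2) p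
        + pvCnt (pvCellA sb 0 0) (pvCellA sb 1 1) (pvCellA sb 2 2) p
        + pvCnt (pvCellA sb 2 0) (pvCellA sb 1 1) (pvCellA sb 0 2) p := by
    simp only [count_2succesive, hr, List.foldl_cons, List.foldl_nil, pvLineA]
  have hB : count_2succesive_alt sb p =
      0 + pvCnt (pvCellB sb 0 0) (pvCellB sb 0 1) (pvCellB sb 0 2) p
        + pvCnt (pvCellB sb 1 0) (pvCellB sb 1 1) (pvCellB sb 1 2) p
        + pvCnt (pvCellB sb 2 0) (pvCellB sb 2 1) (pvCellB sb 2 2) p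
        + pvCnt (pvCellB sb 0 0) (pvCellB sb 1 0) (pvCellB sb 2 0) p
        + pvCnt (pvCellB sb 0 1) (pvCellB sb 1 1) (pvCellB sb 2 1) p
        + pvCnt (pvCellB sb 0 2) (pvCellB sb 1 2) (pvCellB sb 2 2) p
        + pvCnt (pvCellB sb 0 0) (pvCellB sb 1 1) (pvCellB sb 2 2) p
        + pvCnt (pvCellB sb 0 2) (pvCellB sb 1 1) (pvCellB sb 2 0) p := by
    simp only [count_2succesive_alt, hr, List.map_cons, List.map_nil, List.cons_append,
      List.nil_append, List.foldl_cons, List.foldl_nil]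
    simp only [pvLineB]
    norm_num
  rw [pvCellB_eq_A] at hB
  rw [hA, hB, pvCnt_comm (pvCellA sb 2 0) (pvCellA sb 1 1) (pvCellA sb 0 2) p]
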